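-- pv_equiv track=rewrite | github.com/openefaadmin/openefa-installer | openefa-files/modules/analysis.py | check_known_sender
-- ===== SOURCE A (Python) =====
-- def check_known_sender(sender_address, known_senders=None):
--     """
--     Check if the sender is from a known legitimate source
--
--     Returns:
--         bool: True if sender is known and legitimate
--     """
--     if not sender_address or not known_senders:
--         return False
--
--     sender_lower = sender_address.lower()
--     sender_domain = sender_lower.split('@')[-1]
--
--     # Check exact domain match
--     if sender_domain in known_senders:
--         return True
--
--     # Check subdomain matches (e.g., alerts.datto.com matches datto.com)
--     for known_domain in known_senders.keys():
--         if sender_domain.endswith('.' + known_domain) or sender_domain == known_domain: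
--             return True
--
--     return False
-- ===== SOURCE B (Python) =====
-- def check_known_sender(sender_address, known_senders=None):
--     if not sender_address or not known_senders:
--         return False
--     sender_domain = sender_address.lower().split('@')[-1]
--     keys = set(known_senders)
--     if sender_domain in keys:
--         return True
--     for i, ch in enumerate(sender_domain):
--         if ch == '.' and sender_domain[i + 1:] in keys:
--             return True
--     return False
-- ===== Notes on version B (the rewrite author's own statement) =====
-- stated objective: alternative
-- what changed: Instead of scanning every known domain and testing whether the sender domain ends with a dot followed by that key, B builds a set of the keys once and tests the sender domain and each of its dot-suffixes for membership; work per message depends on the domain's labels rather than one pass over all known senders, at the cost of materialising the suffixes.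
import Mathlib
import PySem

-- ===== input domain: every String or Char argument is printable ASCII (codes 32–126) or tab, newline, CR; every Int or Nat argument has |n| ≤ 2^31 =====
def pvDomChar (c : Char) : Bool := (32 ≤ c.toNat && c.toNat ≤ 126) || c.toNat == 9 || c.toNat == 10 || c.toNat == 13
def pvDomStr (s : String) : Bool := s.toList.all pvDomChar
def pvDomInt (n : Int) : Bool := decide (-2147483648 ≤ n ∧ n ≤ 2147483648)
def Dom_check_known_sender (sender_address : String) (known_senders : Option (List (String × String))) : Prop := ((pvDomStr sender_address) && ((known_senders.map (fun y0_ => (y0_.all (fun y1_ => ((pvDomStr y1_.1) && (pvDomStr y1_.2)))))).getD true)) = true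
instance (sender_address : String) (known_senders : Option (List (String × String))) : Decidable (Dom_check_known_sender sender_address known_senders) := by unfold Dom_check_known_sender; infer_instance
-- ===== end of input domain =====

-- B replaces A's scan over all known domains by membership tests of the sender
-- domain's dot-suffixes in a set of the keys built once (objective: alternative).

-- ===== PORT A =====
-- A, literally: empty/None guard; lower; split('@')[-1]; exact key membership; then a
-- scan over the keys testing endswith('.' + key) or equality.
def check_known_sender (sender_address : String) (known_senders : Option (List (String × String))) : Bool :=
  match known_senders with
  | none => false
  | some ks =>
    if sender_address = "" || ks.isEmpty then false
    else
      let sender_lower := PySem.Chars.lower sender_address.toList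
      -- split('@')[-1]: splitOn always returns a nonempty list, so [-1] never raises
      let sender_domain := ((PySem.List.pyGet? (PySem.Chars.splitOn sender_lower ['@']) (-1)).getD [])
      if (ks.map Prod.fst).any (fun k => k.toList == sender_domain) then true
      else if (ks.map Prod.fst).any (fun k =>
          PySem.Chars.endswith sender_domain ('.' :: k.toList) || sender_domain == k.toList) then true
      else false

-- ===== PORT B =====
-- B-side helper: the 'for i, ch in enumerate(domain): if ch == "." and domain[i+1:] in keys'
-- loop, as structural recursion over the domain's characters (each step looks at one
-- character and the slice after it).
def pvSuffixHit (domain : List Char) (keys : PySem.Set (List Char)) : Bool :=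
  match domain with
  | [] => false
  | c :: rest => (c == '.' && PySem.Set.contains keys rest) || pvSuffixHit rest keys

def check_known_sender_alt (sender_address : String) (known_senders : Option (List (String × String))) : Bool :=
  match known_senders with
  | none => false
  | some ks =>
    if sender_address = "" || ks.isEmpty then false
    else
      let sender_domain := ((PySem.List.pyGet? (PySem.Chars.splitOn (PySem.Chars.lower sender_address.toList) ['@']) (-1)).getD [])
      let keys : PySem.Set (List Char) := PySem.Set.ofList (ks.map (fun p => p.1.toList))
      if PySem.Set.contains keys sender_domain then true
      else pvSuffixHit sender_domain keys

-- ===== PRECONDITION & SPEC =====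
def Spec_check_known_sender (sender_address : String) (known_senders : Option (List (String × String))) (out : Bool) : Prop := out = check_known_sender_alt sender_address known_senders
instance (sender_address : String) (known_senders : Option (List (String × String))) (out : Bool) : Decidable (Spec_check_known_sender sender_address known_senders out) := by unfold Spec_check_known_sender; infer_instance

-- ===== CLAIM (what is proved, stated in full; the proofs are below) =====
def Claim_equal_check_known_sender : Prop := ∀ (sender_address : String) (known_senders : Option (List (String × String))), Dom_check_known_sender sender_address known_senders → Spec_check_known_sender sender_address known_senders (check_known_sender sender_address known_senders)

-- ===== LEMMAS AND PROOFS =====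

-- B's suffix loop finds exactly the keys that A's endswith('.' + key) test accepts.
theorem pvSuffixHit_iff (domain : List Char) (keys : PySem.Set (List Char)) :
    pvSuffixHit domain keys = true ↔ ∃ kl ∈ keys, ('.' :: kl) <:+ domain := by
  induction domain with
  | nil => simp [pvSuffixHit]
  | cons c rest ih =>
    simp only [pvSuffixHit, Bool.or_eq_true, Bool.and_eq_true, beq_iff_eq, ih,
      PySem.Set.contains, List.suffix_cons_iff, List.cons_eq_cons,
      List.contains_iff_mem]
    constructor
    · rintro (⟨hc, hk⟩ | ⟨kl, hmem, hsuf⟩)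
      · exact ⟨rest, hk, Or.inl ⟨hc.symm, rfl⟩⟩
      · exact ⟨kl, hmem, Or.inr hsuf⟩
    · rintro ⟨kl, hmem, (⟨hc, hk⟩ | hsuf)⟩
      · exact Or.inl ⟨hc.symm, hk ▸ hmem⟩
      · exact Or.inr ⟨kl, hmem, hsuf⟩

-- Both results are determined by: some key equals the domain, or '.'+key is a suffix of it.
theorem core_eq (domain : List Char) (ks : List (String × String)) :
    ((if (ks.map Prod.fst).any (fun k => k.toList == domain) then true
      else if (ks.map Prod.fst).any (fun k =>
          PySem.Chars.endswith domain ('.' :: k.toList) || domain == k.toList) then true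
      else false) : Bool)
    = (if PySem.Set.contains (PySem.Set.ofList (ks.map (fun p => p.1.toList))) domain then true
       else pvSuffixHit domain (PySem.Set.ofList (ks.map (fun p => p.1.toList)))) := by
  have hA1 : ((ks.map Prod.fst).any (fun k => k.toList == domain) = true)
      ↔ ∃ k ∈ ks, k.1.toList = domain := by
    rw [List.any_map]; simp [List.any_eq_true, Function.comp]
  have hA2 : ((ks.map Prod.fst).any (fun k =>
        PySem.Chars.endswith domain ('.' :: k.toList) || domain == k.toList) = true)
      ↔ ∃ k ∈ ks, ('.' :: k.1.toList) <:+ domain ∨ domain = k.1.toList := by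
    rw [List.any_map]
    simp [List.any_eq_true, Function.comp, PySem.Chars.endswith_iff]
  have hB1 : (PySem.Set.contains (PySem.Set.ofList (ks.map (fun p => p.1.toList))) domain = true)
      ↔ ∃ k ∈ ks, k.1.toList = domain := by
    simp [PySem.Set.contains, PySem.Set.mem_ofList]
  have hB2 : (pvSuffixHit domain (PySem.Set.ofList (ks.map (fun p => p.1.toList))) = true)
      ↔ ∃ k ∈ ks, ('.' :: k.1.toList) <:+ domain := by
    rw [pvSuffixHit_iff]
    constructor
    · rintro ⟨kl, hmem, hs⟩
      rw [PySem.Set.mem_ofList, List.mem_map] at hmem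
      obtain ⟨k, hk, he⟩ := hmem
      exact ⟨k, hk, he ▸ hs⟩
    · rintro ⟨k, hk, hs⟩
      exact ⟨k.1.toList, (PySem.Set.mem_ofList _ _).2 (List.mem_map.2 ⟨k, hk, rfl⟩), hs⟩
  by_cases p1 : ∃ k ∈ ks, k.1.toList = domain
  · rw [if_pos (hA1.2 p1), if_pos (hB1.2 p1)]
  · rw [if_neg (fun h => p1 (hA1.1 h)), if_neg (fun h => p1 (hB1.1 h))]
    by_cases p2 : ∃ k ∈ ks, ('.' :: k.1.toList) <:+ domain
    · rw [if_pos (hA2.2 (p2.imp fun k h => ⟨h.1, Or.inl h.2⟩)), hB2.2 p2]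
    · rw [if_neg, Bool.eq_false_iff.2 (fun h => p2 (hB2.1 h))]
      intro h
      obtain ⟨k, hk, (hs | he)⟩ := hA2.1 h
      · exact p2 ⟨k, hk, hs⟩
      · exact p1 ⟨k, hk, he.symm⟩

-- ===== VERDICT (by name: the statement is the Claim_ definition above) =====
theorem check_known_sender_spec : Claim_equal_check_known_sender := by
  intro sender_address known_senders _
  unfold Spec_check_known_sender check_known_sender check_known_sender_alt
  match known_senders with
  | none => rfl
  | some ks =>
    simp only
    split
    · rfl
    · exact core_eq _ ks
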